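-- pv_equiv track=rewrite | github.com/Soheil-jafari/Language-Guided-Endoscopy-Localization | train.py | _decode_segments
-- ===== SOURCE A (Python) =====
-- def _decode_segments(binary_vec):
--     segs = []
--     s = None
--     for i, v in enumerate(binary_vec):
--         if v and s is None:
--             s = i
--         if (not v or i == len(binary_vec)-1) and s is not None:
--             e = i if v else i-1
--             segs.append((s, e))  # inclusive frame indices
--             s = None
--     return segs
-- ===== SOURCE B (Python) =====
-- from itertools import groupby
--
-- def _decode_segments(binary_vec):
--     segs = []
--     i = 0
--     for key, grp in groupby(binary_vec, key=bool):
--         n = sum(1 for _ in grp)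
--         if key:
--             segs.append((i, i + n - 1))
--         i += n
--     return segs
-- ===== Notes on version B (the rewrite author's own statement) =====
-- stated objective: idiomatic
-- what changed: Replaced A's per-element loop threading a sentinel start-state s (with a last-index special case) by an itertools.groupby decomposition into maximal runs: each truthy run of length n emits (i, i+n-1) directly while a running offset i advances by every run's length.
import Mathlib
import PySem

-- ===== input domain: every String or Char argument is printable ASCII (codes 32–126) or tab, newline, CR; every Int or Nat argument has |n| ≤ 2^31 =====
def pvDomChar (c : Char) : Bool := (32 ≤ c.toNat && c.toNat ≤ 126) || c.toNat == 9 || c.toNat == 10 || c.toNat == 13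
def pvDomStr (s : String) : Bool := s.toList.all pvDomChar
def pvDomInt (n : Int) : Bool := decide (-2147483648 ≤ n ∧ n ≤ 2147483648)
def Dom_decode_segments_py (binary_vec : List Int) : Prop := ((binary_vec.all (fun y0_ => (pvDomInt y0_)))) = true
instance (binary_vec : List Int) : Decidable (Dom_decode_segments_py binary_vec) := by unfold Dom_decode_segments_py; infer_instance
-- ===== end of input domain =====

-- B replaces A's sentinel-state element loop by an itertools.groupby run decomposition (objective: idiomatic/alternative; same O(n) cost).

-- ===== PORT A =====
-- loop of A over enumerate(binary_vec), threading (segs, s)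
def aGo (n : Int) (s : Option Int) (segs : List (Int × Int)) : List (Int × Int) → List (Int × Int)
  | [] => segs
  | (i, v) :: rest =>
    let s1 := if v ≠ 0 ∧ s = none then some i else s
    if (v = 0 ∨ i = n - 1) ∧ s1 ≠ none then
      aGo n none (segs ++ [(s1.getD 0, if v ≠ 0 then i else i - 1)]) rest
    else
      aGo n s1 segs rest

def decode_segments_py (binary_vec : List Int) : List (Int × Int) :=
  aGo (binary_vec.length : Int) none [] (PySem.List.enumerate binary_vec)

-- ===== PORT B =====
-- one step per groupby group: measure the run length n, emit (i, i+n-1) for a truthy run, advance i by n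
def bGo (i : Int) : List Int → List (Int × Int)
  | [] => []
  | v :: t =>
    if v ≠ 0 then
      let n : Int := 1 + ((t.takeWhile (fun x => decide (x ≠ 0))).length : Int)
      (i, i + n - 1) :: bGo (i + n) (t.dropWhile (fun x => decide (x ≠ 0)))
    else
      let n : Int := 1 + ((t.takeWhile (fun x => decide (x = 0))).length : Int)
      bGo (i + n) (t.dropWhile (fun x => decide (x = 0)))
termination_by l => l.length
decreasing_by
  · exact Nat.lt_succ_of_le (List.length_dropWhile_le _ _)
  · exact Nat.lt_succ_of_le (List.length_dropWhile_le _ _)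

def decode_segments_py_alt (binary_vec : List Int) : List (Int × Int) :=
  bGo 0 binary_vec

-- ===== PRECONDITION & SPEC =====
def Spec_decode_segments_py (binary_vec : List Int) (out : List (Int × Int)) : Prop := out = decode_segments_py_alt binary_vec
instance (binary_vec : List Int) (out : List (Int × Int)) : Decidable (Spec_decode_segments_py binary_vec out) := by unfold Spec_decode_segments_py; infer_instance

-- ===== CLAIM (what is proved, stated in full; the proofs are below) =====
def Claim_equal_decode_segments_py : Prop := ∀ (binary_vec : List Int), Dom_decode_segments_py binary_vec → Spec_decode_segments_py binary_vec (decode_segments_py binary_vec)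

-- ===== LEMMAS AND PROOFS =====

theorem bGo_nil (i : Int) : bGo i [] = [] := by rw [bGo.eq_def]

theorem bGo_pos (i v : Int) (t : List Int) (hv : v ≠ 0) :
    bGo i (v :: t) =
      (i, i + (1 + ((t.takeWhile (fun x => decide (x ≠ 0))).length : Int)) - 1)
        :: bGo (i + (1 + ((t.takeWhile (fun x => decide (x ≠ 0))).length : Int)))
             (t.dropWhile (fun x => decide (x ≠ 0))) := by
  rw [bGo.eq_def]; simp [hv]

theorem bGo_zerohead (i : Int) (t : List Int) :
    bGo i (0 :: t) =
      bGo (i + (1 + ((t.takeWhile (fun x => decide (x = 0))).length : Int)))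
        (t.dropWhile (fun x => decide (x = 0))) := by
  rw [bGo.eq_def]; simp

-- what A's loop produces from state `some j` at position i over remainder l
def contB (j i : Int) (l : List Int) : List (Int × Int) :=
  (j, i + ((l.takeWhile (fun x => decide (x ≠ 0))).length : Int) - 1)
    :: bGo (i + ((l.takeWhile (fun x => decide (x ≠ 0))).length : Int) + 1)
         (l.drop ((l.takeWhile (fun x => decide (x ≠ 0))).length + 1))

-- skipping a zero one element at a time agrees with skipping the whole zero run
theorem bGo_zero (i : Int) (t : List Int) : bGo i (0 :: t) = bGo (i + 1) t := by
  cases t with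
  | nil => rw [bGo_zerohead]; simp
  | cons w t' =>
    by_cases hw : w = 0
    · subst hw
      rw [bGo_zerohead, bGo_zerohead]
      simp [List.takeWhile, List.dropWhile]
      congr 1
      ring
    · rw [bGo_zerohead]
      simp [List.takeWhile, List.dropWhile, hw]

theorem dropWhile_eq_drop (p : Int → Bool) (l : List Int) :
    l.dropWhile p = l.drop (l.takeWhile p).length := by
  induction l with
  | nil => rfl
  | cons v t ih =>
    by_cases hv : p v
    · simp [hv, ih]
    · simp [hv]

theorem dropWhile_head_false (p : Int → Bool) (t : List Int) (z : Int) (rest : List Int)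
    (h : t.dropWhile p = z :: rest) : p z = false := by
  induction t with
  | nil => simp at h
  | cons v t ih =>
    by_cases hv : p v
    · rw [List.dropWhile_cons_of_pos hv] at h; exact ih h
    · rw [List.dropWhile_cons_of_neg hv] at h
      cases h
      simpa using hv

-- restarting B after a closed run: the element after the run (if any) is a zero
theorem bGo_step (a : Int) (t : List Int) :
    bGo (a + 1) (t.drop ((t.takeWhile (fun x => decide (x ≠ 0))).length + 1)) =
      bGo a (t.dropWhile (fun x => decide (x ≠ 0))) := by
  have hd := dropWhile_eq_drop (fun x => decide (x ≠ 0)) t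
  cases h : t.dropWhile (fun x => decide (x ≠ 0)) with
  | nil =>
    have hlen : t.length ≤ (t.takeWhile (fun x => decide (x ≠ 0))).length := by
      have := hd ▸ h
      have := List.drop_eq_nil_iff.mp this
      omega
    rw [List.drop_eq_nil_of_le (by omega)]
    rw [bGo_nil, bGo_nil]
  | cons z rest =>
    have hz : z = 0 := by
      have := dropWhile_head_false (fun x => decide (x ≠ 0)) t z rest h
      simpa using this
    have htail : t.drop ((t.takeWhile (fun x => decide (x ≠ 0))).length + 1) = rest := by
      rw [← List.tail_drop, ← hd, h]
      rfl
    subst hz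
    rw [htail, bGo_zero]

theorem main_lemma (l : List Int) :
    (∀ (i : Int) (segs : List (Int × Int)),
      aGo (i + (l.length : Int)) none segs (PySem.List.enumerate l i) = segs ++ bGo i l)
    ∧ (∀ (i j : Int) (segs : List (Int × Int)), l ≠ [] →
      aGo (i + (l.length : Int)) (some j) segs (PySem.List.enumerate l i) = segs ++ contB j i l) := by
  induction l with
  | nil =>
    constructor
    · intro i segs; simp [PySem.List.enumerate, aGo, bGo_nil]
    · intro i j segs h; exact absurd rfl h
  | cons v t ih =>
    obtain ⟨ih1, ih2⟩ := ih
    constructor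
    · intro i segs
      rw [PySem.List.enumerate_cons, aGo]
      by_cases hv : v = 0
      · subst hv
        norm_num
        rw [bGo_zero, show i + ((t.length : Int) + 1) = (i + 1) + (t.length : Int) by ring,
          ih1 (i+1) segs]
      · -- v ≠ 0: state becomes some i
        simp only [hv, ne_eq, not_false_eq_true, true_and, if_true]
        cases t with
        | nil =>
          rw [if_pos (by simp)]
          simp [PySem.List.enumerate, aGo, bGo_pos i v [] hv, bGo_nil]
        | cons w t' =>
          rw [if_neg (by
            rintro ⟨h1 | h2, -⟩
            · exact h1.elim
            · simp only [List.length_cons] at h2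
              omega)]
          rw [show i + ((v :: w :: t').length : Int) = (i + 1) + ((w :: t').length : Int) by
            simp only [List.length_cons]; push_cast; ring]
          rw [ih2 (i+1) i segs (by simp)]
          congr 1
          rw [bGo_pos i v (w :: t') hv]
          unfold contB
          by_cases hw : w = 0
          · subst hw
            simp only [List.takeWhile_cons, ne_eq, not_true_eq_false, decide_false,
              Bool.false_eq_true, if_false, List.length_nil, Nat.cast_zero,
              List.dropWhile_cons, List.drop_succ_cons, List.drop_zero]
            rw [bGo_zero]
            norm_num
          · have hkw : (List.takeWhile (fun x => decide (x ≠ 0)) (w :: t')) =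
                w :: List.takeWhile (fun x => decide (x ≠ 0)) t' := by
              simp [hw]
            rw [hkw]
            rw [List.dropWhile_cons_of_pos (by simp [hw])]
            simp only [List.length_cons, List.drop_succ_cons]
            push_cast
            congr 1
            · simp only [Prod.mk.injEq, true_and]
              ring
            · rw [show i + 1 + (((List.takeWhile (fun x => decide (x ≠ 0)) t').length : Int) + 1) + 1 =
                (i + (1 + (((List.takeWhile (fun x => decide (x ≠ 0)) t').length : Int) + 1))) + 1 by ring]
              exact bGo_step _ t'
    · intro i j segs hne
      rw [PySem.List.enumerate_cons, aGo]
      simp only [Option.some_ne_none, and_false, if_false, ne_eq,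
        not_false_eq_true, and_true]
      by_cases hv : v = 0
      · subst hv
        rw [if_pos (Or.inl rfl)]
        norm_num
        rw [show i + ((t.length : Int) + 1) = (i + 1) + (t.length : Int) by ring, ih1 (i+1)]
        simp [contB]
      · cases t with
        | nil =>
          rw [if_pos (Or.inr (by simp))]
          simp [PySem.List.enumerate, aGo, contB, hv, bGo_nil]
        | cons w t' =>
          rw [if_neg (by
            rintro (h1 | h2)
            · exact hv h1
            · simp only [List.length_cons] at h2
              omega)]
          rw [show i + ((v :: w :: t').length : Int) = (i + 1) + ((w :: t').length : Int) by
            simp only [List.length_cons]; push_cast; ring]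
          rw [ih2 (i+1) j segs (by simp)]
          congr 1
          unfold contB
          rw [show List.takeWhile (fun x => decide (x ≠ 0)) (v :: w :: t') =
            v :: List.takeWhile (fun x => decide (x ≠ 0)) (w :: t') by simp [hv]]
          simp only [List.length_cons, List.drop_succ_cons]
          push_cast
          congr 1
          · simp only [Prod.mk.injEq, true_and]
            ring
          · congr 1
            ring

theorem decode_segments_py_spec : Claim_equal_decode_segments_py := by
  intro bv _
  unfold Spec_decode_segments_py decode_segments_py decode_segments_py_alt
  have := (main_lemma bv).1 0 []
  simpa using this
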